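-- pv_equiv track=rewrite | github.com/probapraise/project_newborn | src/lifeops/rulebook.py | _domain_matches
-- ===== SOURCE A (Python) =====
-- def _domain_matches(domain: str | None, candidates: list[str]) -> bool:
--     normalized = (domain or "").lower().removeprefix("www.")
--     if not normalized:
--         return False
--     for candidate in candidates:
--         item = candidate.lower().removeprefix("www.")
--         if normalized == item or normalized.endswith("." + item):
--             return True
--     return False
-- ===== SOURCE B (Python) =====
-- def _domain_matches(domain, candidates):
--     normalized = (domain or "").lower().removeprefix("www.")
--     if not normalized:
--         return False
--     cand_set = {c.lower().removeprefix("www.") for c in candidates}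
--     suffixes = [normalized] + [normalized[i + 1:] for i, ch in enumerate(normalized) if ch == '.']
--     return any(s in cand_set for s in suffixes)
-- ===== Notes on version B (the rewrite author's own statement) =====
-- stated objective: alternative
-- what changed: A loops over candidates testing equality or endswith('.'+item) for each; B normalizes the candidates into a set once, builds the domain's list of dot-suffixes, and returns whether the two collections intersect.
import Mathlib
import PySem

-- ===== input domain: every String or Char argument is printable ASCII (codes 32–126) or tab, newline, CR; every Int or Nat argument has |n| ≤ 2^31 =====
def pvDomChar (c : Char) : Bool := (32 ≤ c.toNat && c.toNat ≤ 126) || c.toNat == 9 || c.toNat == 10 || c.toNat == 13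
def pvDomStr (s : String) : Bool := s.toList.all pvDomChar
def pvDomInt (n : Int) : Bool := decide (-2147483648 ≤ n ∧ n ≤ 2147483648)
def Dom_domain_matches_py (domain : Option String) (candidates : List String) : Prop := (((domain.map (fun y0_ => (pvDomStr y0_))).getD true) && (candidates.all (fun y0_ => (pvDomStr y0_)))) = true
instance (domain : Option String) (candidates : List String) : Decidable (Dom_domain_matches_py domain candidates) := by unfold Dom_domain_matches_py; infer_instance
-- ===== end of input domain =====

-- B replaces A's per-candidate equality/endswith loop by a different decomposition: it builds
-- the set of normalized candidates once and the list of dot-suffixes of the domain, and asks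
-- whether they intersect (objective: alternative, same result on every input).

-- shared normalization: s.lower().removeprefix("www.") on List Char (removeprefix ported by
-- hand, exact: drop exactly the prefix iff the lowered string starts with it)
def pvNormalize (s : String) : List Char :=
  let low := PySem.Chars.lower s.toList
  if PySem.Chars.startswith low "www.".toList then low.drop 4 else low

-- ===== PORT A =====
def domain_matches_py (domain : Option String) (candidates : List String) : Bool :=
  let normalized := pvNormalize (domain.getD "")
  if normalized = [] then false
  else
    candidates.any (fun candidate =>
      let item := pvNormalize candidate
      normalized == item || PySem.Chars.endswith normalized ('.' :: item))

-- ===== PORT B =====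
def domain_matches_py_alt (domain : Option String) (candidates : List String) : Bool :=
  let normalized := pvNormalize (domain.getD "")
  if normalized = [] then false
  else
    let candSet := PySem.Set.ofList (candidates.map (fun c => pvNormalize c))
    let suffixes := normalized ::
      (PySem.List.enumerate normalized).filterMap (fun p =>
        if p.2 = '.' then some (PySem.List.slice normalized (some (p.1 + 1)) none) else none)
    suffixes.any (fun s => PySem.Set.contains candSet s)

-- ===== PRECONDITION & SPEC =====
def Spec_domain_matches_py (domain : Option String) (candidates : List String) (out : Bool) : Prop := out = domain_matches_py_alt domain candidates
instance (domain : Option String) (candidates : List String) (out : Bool) : Decidable (Spec_domain_matches_py domain candidates out) := by unfold Spec_domain_matches_py; infer_instance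

-- ===== CLAIM (what is proved, stated in full; the proofs are below) =====
def Claim_equal_domain_matches_py : Prop := ∀ (domain : Option String) (candidates : List String), Dom_domain_matches_py domain candidates → Spec_domain_matches_py domain candidates (domain_matches_py domain candidates)

-- ===== LEMMAS AND PROOFS =====

-- membership in B's suffix list is: the whole string, or a tail that starts right after a '.'
theorem mem_suffixes_iff (norm it : List Char) :
    (it ∈ norm ::
        (PySem.List.enumerate norm).filterMap (fun p =>
          if p.2 = '.' then some (PySem.List.slice norm (some (p.1 + 1)) none) else none)) ↔
      (it = norm ∨ ('.' :: it) <:+ norm) := by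
  simp only [List.mem_cons, List.mem_filterMap, PySem.List.mem_enumerate_iff]
  constructor
  · rintro (rfl | ⟨p, ⟨k, hk, rfl⟩, hf⟩)
    · exact Or.inl rfl
    · simp only [] at hf
      split_ifs at hf with hdot
      refine Or.inr ⟨norm.take k, ?_⟩
      have hs : PySem.List.slice norm (some ((0:Int) + k + 1)) none = norm.drop (k+1) := by
        rw [PySem.List.slice_from norm (by omega)]
        congr 1
        omega
      rw [hs] at hf
      injection hf with hf
      rw [← hf, ← hdot]
      calc List.take k norm ++ norm[k] :: List.drop (k+1) norm
          = List.take k norm ++ norm.drop k := by rw [List.drop_eq_getElem_cons hk]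
        _ = norm := List.take_append_drop k norm
  · rintro (rfl | ⟨pre, hpre⟩)
    · exact Or.inl rfl
    · right
      have hk : pre.length < norm.length := by
        rw [← hpre]; simp
      have hdrop : norm.drop pre.length = '.' :: it := by
        rw [← hpre, List.drop_left]
      have hdot : norm[pre.length] = '.' := by
        have h2 := List.drop_eq_getElem_cons (l := norm) (i := pre.length) hk
        rw [hdrop] at h2
        exact (List.cons.injEq .. ▸ h2).1.symm
      refine ⟨((0:Int) + pre.length, norm[pre.length]), ⟨pre.length, hk, rfl⟩, ?_⟩
      simp only [hdot, if_pos]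
      rw [PySem.List.slice_from norm (by omega)]
      have h3 : (((0:Int) + pre.length + 1)).toNat = pre.length + 1 := by omega
      rw [h3]
      have h4 : norm.drop (pre.length + 1) = it := by
        have h5 := List.drop_eq_getElem_cons (l := norm) (i := pre.length) hk
        rw [hdrop, hdot] at h5
        exact (List.cons.injEq .. ▸ h5).2.symm
      rw [h4]

-- A's per-candidate test is exactly membership of the normalized candidate in B's suffix list
theorem candidate_test_iff (norm it : List Char) :
    (norm == it || PySem.Chars.endswith norm ('.' :: it)) = true ↔
      (it ∈ norm ::
        (PySem.List.enumerate norm).filterMap (fun p =>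
          if p.2 = '.' then some (PySem.List.slice norm (some (p.1 + 1)) none) else none)) := by
  rw [mem_suffixes_iff]
  simp only [Bool.or_eq_true, beq_iff_eq, PySem.Chars.endswith_iff]
  constructor
  · rintro (rfl | h)
    · exact Or.inl rfl
    · exact Or.inr h
  · rintro (rfl | h)
    · exact Or.inl rfl
    · exact Or.inr h

-- ===== VERDICT (by name: the statement is the Claim_ definition above) =====
theorem domain_matches_py_spec : Claim_equal_domain_matches_py := by
  intro domain candidates _dom
  unfold Spec_domain_matches_py domain_matches_py domain_matches_py_alt
  simp only []
  split
  · rfl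
  · rw [Bool.eq_iff_iff, List.any_eq_true, List.any_eq_true]
    constructor
    · rintro ⟨c, hc, ht⟩
      refine ⟨pvNormalize c, (candidate_test_iff _ _).1 ht, ?_⟩
      rw [PySem.Set.contains_iff, PySem.Set.mem_ofList]
      exact List.mem_map.2 ⟨c, hc, rfl⟩
    · rintro ⟨s, hs, hmem⟩
      rw [PySem.Set.contains_iff, PySem.Set.mem_ofList] at hmem
      obtain ⟨c, hc, rfl⟩ := List.mem_map.1 hmem
      exact ⟨c, hc, (candidate_test_iff _ _).2 hs⟩
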